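-- pv_equiv track=rewrite | github.com/SadBrumla/work | 00_OOP_pristup/format_text.py | edit_subscript
-- ===== SOURCE A (Python) =====
-- def edit_subscript(sub_list):
--     output = ""
--     dash_strings = ["tt", "ss","1tt","2tt","1ss","2ss", "Ass", "Att","HP1tt","HP1ss"]
--     do_dash = True
--     for sub in sub_list:
--         output += sub
--
--         if sub in dash_strings and do_dash :
--             output += "/"
--             do_dash = False
--
--     return output
-- ===== SOURCE B (Python) =====
-- def edit_subscript(sub_list):
--     dash_strings = {"tt", "ss", "1tt", "2tt", "1ss", "2ss", "Ass", "Att", "HP1tt", "HP1ss"}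
--     i = next((j for j, s in enumerate(sub_list) if s in dash_strings), None)
--     if i is None:
--         return "".join(sub_list)
--     return "".join(sub_list[:i + 1]) + "/" + "".join(sub_list[i + 1:])
-- ===== Notes on version B (the rewrite author's own statement) =====
-- stated objective: simpler
-- what changed: Replaces the accumulate-with-boolean-flag loop by finding the index of the first dash string and concatenating two joins around one slash.
import Mathlib
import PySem

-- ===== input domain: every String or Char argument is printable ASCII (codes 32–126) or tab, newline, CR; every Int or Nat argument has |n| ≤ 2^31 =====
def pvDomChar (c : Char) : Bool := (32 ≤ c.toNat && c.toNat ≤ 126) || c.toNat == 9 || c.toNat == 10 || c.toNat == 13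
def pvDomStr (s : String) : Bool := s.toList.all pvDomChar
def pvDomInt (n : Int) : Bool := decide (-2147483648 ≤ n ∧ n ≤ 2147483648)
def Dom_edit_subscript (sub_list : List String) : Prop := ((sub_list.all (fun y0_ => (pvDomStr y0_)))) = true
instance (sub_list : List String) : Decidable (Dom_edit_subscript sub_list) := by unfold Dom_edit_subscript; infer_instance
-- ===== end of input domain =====

-- B replaces A's accumulate-with-boolean-flag loop by finding the index of the first
-- dash string and concatenating two joins around one slash (objective: simpler).

-- the module constant dash_strings, held as lists of chars (String equality = toList equality)
def pvDash : List (List Char) :=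
  [['t','t'], ['s','s'], ['1','t','t'], ['2','t','t'], ['1','s','s'], ['2','s','s'],
   ['A','s','s'], ['A','t','t'], ['H','P','1','t','t'], ['H','P','1','s','s']]

-- ===== PORT A =====
-- literal port of A: fold over sub_list carrying (output, do_dash); strings handled as
-- List Char (Python '+=' on str is exact list append; 'sub in dash_strings' is list membership)
def edit_subscript (sub_list : List String) : String :=
  let r := sub_list.foldl
    (fun (st : List Char × Bool) sub =>
      let output := st.1 ++ sub.toList
      if sub.toList ∈ pvDash ∧ st.2 = true then (output ++ ['/'], false)
      else (output, st.2))
    ([], true)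
  String.ofList r.1

-- ===== PORT B =====
-- literal port of B: first matching index via findIdx?, then two joins around '/'
def edit_subscript_alt (sub_list : List String) : String :=
  match sub_list.findIdx? (fun s => s.toList ∈ pvDash) with
  | none => PySem.Str.join "" sub_list
  | some i =>
      String.ofList ((PySem.Chars.join [] ((sub_list.take (i + 1)).map String.toList))
        ++ ['/'] ++ (PySem.Chars.join [] ((sub_list.drop (i + 1)).map String.toList)))

-- ===== PRECONDITION & SPEC =====
def Spec_edit_subscript (sub_list : List String) (out : String) : Prop := out = edit_subscript_alt sub_list
instance (sub_list : List String) (out : String) : Decidable (Spec_edit_subscript sub_list out) := by unfold Spec_edit_subscript; infer_instance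

-- ===== CLAIM (what is proved, stated in full; the proofs are below) =====
def Claim_equal_edit_subscript : Prop := ∀ (sub_list : List String), Dom_edit_subscript sub_list → Spec_edit_subscript sub_list (edit_subscript sub_list)

-- ===== LEMMAS AND PROOFS =====

-- A's loop body
def pvStep (st : List Char × Bool) (sub : String) : List Char × Bool :=
  let output := st.1 ++ sub.toList
  if sub.toList ∈ pvDash ∧ st.2 = true then (output ++ ['/'], false)
  else (output, st.2)

theorem pvLoop_false (xs : List String) (acc : List Char) :
    xs.foldl pvStep (acc, false)
      = (acc ++ (xs.map String.toList).flatten, false) := by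
  induction xs generalizing acc with
  | nil => simp
  | cons x xs ih =>
      simp [pvStep, ih, List.append_assoc]

theorem pvLoop_true (xs : List String) (acc : List Char) :
    xs.foldl pvStep (acc, true)
      = match xs.findIdx? (fun s => s.toList ∈ pvDash) with
        | none => (acc ++ (xs.map String.toList).flatten, true)
        | some i => (acc ++ ((xs.take (i + 1)).map String.toList).flatten
            ++ ['/'] ++ ((xs.drop (i + 1)).map String.toList).flatten, false) := by
  induction xs generalizing acc with
  | nil => simp
  | cons x xs ih =>
      by_cases hx : x.toList ∈ pvDash
      · simp [pvStep, hx, List.findIdx?_cons, pvLoop_false, List.append_assoc]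
      · simp only [List.foldl_cons, pvStep, hx, false_and, if_false, ih,
          List.findIdx?_cons, decide_eq_true_eq]
        cases h : xs.findIdx? (fun s => s.toList ∈ pvDash) with
        | none => simp [List.append_assoc]
        | some i =>
            simp [List.append_assoc]

theorem pv_join_flatten (l : List (List Char)) :
    PySem.Chars.join [] l = l.flatten := by
  simp [PySem.Chars.join, List.intercalate]
  induction l with
  | nil => rfl
  | cons x l ih =>
      cases l with
      | nil => simp
      | cons y l => simpa [List.intersperse] using ih

-- ===== VERDICT (by name: the statement is the Claim_ definition above) =====
theorem edit_subscript_spec : Claim_equal_edit_subscript := by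
  intro sub_list _
  unfold Spec_edit_subscript edit_subscript edit_subscript_alt
  show String.ofList (sub_list.foldl pvStep ([], true)).1 = _
  rw [pvLoop_true]
  cases h : sub_list.findIdx? (fun s => s.toList ∈ pvDash) with
  | none => simp [PySem.Str.join, pv_join_flatten]
  | some i => simp [pv_join_flatten, List.append_assoc]
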